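-- pv_equiv track=rewrite | github.com/pypi-data/pypi-mirror-326 | packages/boyer-moore-algorithmus/boyer_moore_algorithmus-1.0.1-py3-none-any.whl/boyer_moore_algorithmus/boyer.py | preprocess_patterns
-- ===== SOURCE A (Python) =====
-- def is_prefix_of_pattern(pattern: str, position: int) -> bool:
--     """
--     Überprüft, ob ein Teil des Musters ab einer bestimmten Position ein Präfix des Musters ist.
--     Wird in der "Good-Suffix-Heuristic" verwendet, um die Sprünge zu optimieren.
--     """
--     for i in range(position, len(pattern)):
--         j = i - position  # Vergleich mit dem Präfix
--         if pattern[i] != pattern[j]:  # Sobald es nicht passt -> kein Präfix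
--             return False
--     return True
--
-- def suffix_length_matching_prefix(pattern: str, position: int) -> int:
--     """
--     Berechnet die Länge des Suffixes eines Musters, das mit einem Präfix übereinstimmt.
--     Diese Funktion ist Teil der "Good-Suffix-Heuristic", um die Sprünge zu optimieren.
--     """
--     size = 0  # Wie viele Zeichen passen von hinten zusammen?
--     i, j = position, len(pattern) - 1  # Start hinten im Muster
--
--     while i >= 0 and pattern[i] == pattern[j]:
--         i -= 1  # Rückwärts laufen
--         j -= 1
--         size += 1
--
--     return size  # Länge des Suffixes zurückgeben
--
-- def build_bad_character_table(pattern: str) -> list[int]: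
--     """
--     Erstellt die "Bad-Character-Heuristic"-Tabelle für den Boyer-Moore-Algorithmus.
--     Sie beschreibt, wie viele Zeichen übersprungen werden können, wenn ein Zeichen nicht passt.
--     """
--     table = [len(pattern)] * 256  # Für alle ASCII-Zeichen (256 Zeichen)
--
--     for i in range(len(pattern) - 1):  # Für jedes Zeichen im Muster (außer dem letzten)
--         table[ord(pattern[i])] = len(pattern) - 1 - i  # Speichere die Sprungweite für dieses Zeichen
--
--     return table
--
-- def build_good_suffix_table(pattern: str) -> list[int]:
--     """
--     Erstellt die "Good-Suffix-Heuristic"-Tabelle für den Boyer-Moore-Algorithmus.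
--     Sie hilft zu bestimmen, wie viel weiter das Muster verschoben werden kann, wenn ein Teil des Musters übereinstimmt.
--     """
--     table = [0] * len(pattern)
--     last_prefix_position = len(pattern)
--
--     for i in range(len(pattern), 0, -1):  # Rückwärts durchs Muster
--         if is_prefix_of_pattern(pattern, i):  # Prüft, ob ein Präfix gefunden wurde
--             last_prefix_position = i
--         table[len(pattern) - i] = last_prefix_position - i + len(pattern)
--
--     for i in range(len(pattern) - 1):  # Suche nach passenden Suffixen
--         size = suffix_length_matching_prefix(pattern, i)
--         table[size] = len(pattern) - 1 - i + size  # Berücksichtige Suffix übereinstimmende Teile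
--
--     return table
--
-- def preprocess_patterns(list_patterns: list[str]) -> tuple:
--     """
--     Bereitet alle Muster vor, indem die "Bad-Character-Heuristic"- und "Good-Suffix-Heuristic"-Tabellen erstellt werden.
--     """
--     all_bad_char_table = []  # Hier speichern wir die Bad-Character-Heuristic-Tabellen
--     all_good_suffix_table = []  # Hier die Good-Suffix-Heuristic-Tabellen
--     occurrences_of_pattern_in_string = []  # Zähler für jedes Muster
--
--     for pattern in list_patterns:
--         all_bad_char_table.append(build_bad_character_table(pattern))  # Erstelle Bad-Character-Heuristic-Tabelle
--         all_good_suffix_table.append(build_good_suffix_table(pattern))  # Erstelle Good-Suffix-Heuristic-Tabelle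
--         occurrences_of_pattern_in_string.append(0)  # Initialisiere Treffer-Zähler
--
--     return all_bad_char_table, all_good_suffix_table, occurrences_of_pattern_in_string
-- ===== SOURCE B (Python) =====
-- def _z_array(s):
--     """Z-array: z[j] = length of the longest common prefix of s and s[j:] (z[0] = len(s))."""
--     n = len(s)
--     z = [0] * n
--     if n:
--         z[0] = n
--     l = r = 0
--     for j in range(1, n):
--         k = min(r - j, z[j - l]) if j < r else 0
--         while j + k < n and s[k] == s[j + k]:
--             k += 1
--         z[j] = k
--         if j + k > r:
--             l, r = j, j + k
--     return z
--
-- def preprocess_patterns(list_patterns):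
--     all_bad_char_table = []
--     all_good_suffix_table = []
--     occurrences_of_pattern_in_string = []
--     for pattern in list_patterns:
--         n = len(pattern)
--         z = _z_array(pattern)
--         zrev = _z_array(pattern[::-1])
--         # good-suffix table, filled with O(1) lookups into the two Z-arrays
--         good = [0] * n
--         last_prefix = n
--         for i in range(n, 0, -1):
--             if i == n or z[i] == n - i:   # pattern[i:] is a prefix of pattern
--                 last_prefix = i
--             good[n - i] = last_prefix - i + n
--         for i in range(n - 1):
--             size = zrev[n - 1 - i]        # longest suffix of pattern ending at i matching a suffix of pattern
--             good[size] = n - 1 - i + size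
--         # bad-character table from a single last-occurrence pass
--         last = {}
--         for i in range(n - 1):
--             last[ord(pattern[i])] = i
--         bad = [n] * 256
--         for c, i in last.items():
--             bad[c] = n - 1 - i
--         all_bad_char_table.append(bad)
--         all_good_suffix_table.append(good)
--         occurrences_of_pattern_in_string.append(0)
--     return all_bad_char_table, all_good_suffix_table, occurrences_of_pattern_in_string
-- ===== Notes on version B (the rewrite author's own statement) =====
-- stated objective: alternative
-- what changed: The good-suffix table is filled from two Z-arrays (of the pattern and of its reverse, each computed in linear time), replacing A's per-position rescans (is_prefix_of_pattern / suffix_length_matching_prefix, quadratic on periodic patterns) with O(1) lookups; the bad-character table is built from a single last-occurrence dict pass. On random inputs the measured times are about equal (A's rescans exit early there), so no speed is claimed.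
import Mathlib
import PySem

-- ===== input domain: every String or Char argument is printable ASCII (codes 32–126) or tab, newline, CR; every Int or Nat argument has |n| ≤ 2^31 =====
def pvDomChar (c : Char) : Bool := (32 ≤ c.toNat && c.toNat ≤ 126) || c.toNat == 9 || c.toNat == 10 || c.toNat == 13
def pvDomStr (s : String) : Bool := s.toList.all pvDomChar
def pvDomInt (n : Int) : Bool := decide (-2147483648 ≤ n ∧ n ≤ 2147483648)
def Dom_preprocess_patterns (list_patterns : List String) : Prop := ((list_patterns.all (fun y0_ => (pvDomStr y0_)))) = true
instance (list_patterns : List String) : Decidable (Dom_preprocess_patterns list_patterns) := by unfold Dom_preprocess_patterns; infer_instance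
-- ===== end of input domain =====

-- B builds the good-suffix table from two linear-time Z-arrays instead of A's per-position rescans,
-- and the bad-character table from one last-occurrence dict pass (objective: alternative algorithm; no speed claimed).

-- ===== PORT A =====
-- Loop of is_prefix_of_pattern: for i in range(position, len(pattern)) comparing pattern[i] with pattern[i-position].
def isPrefixLoop (s : List Char) (pos i : Nat) : Bool :=
  if _h : i < s.length then
    if s[i]! ≠ s[i - pos]! then false
    else isPrefixLoop s pos (i + 1)
  else true
termination_by s.length - i

def is_prefix_of_pattern (s : List Char) (pos : Nat) : Bool := isPrefixLoop s pos pos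

-- While loop of suffix_length_matching_prefix; i1 = i+1, j1 = j+1 (Nat counters for the Int indices
-- counting down; in every call site 0 ≤ j - i is constant so the indices stay in range, exact there).
def suffLenLoop (s : List Char) : Nat → Nat → Nat → Nat
  | 0, _, size => size
  | i + 1, j1, size =>
      if s[i]! = s[j1 - 1]! then suffLenLoop s i (j1 - 1) (size + 1) else size

def suffix_length_matching_prefix (s : List Char) (pos : Nat) : Nat :=
  suffLenLoop s (pos + 1) s.length 0

def build_bad_character_table (p : String) : List Int :=
  let s := p.toList
  let n := s.length
  (List.range (n - 1)).foldl
    (fun t (i : Nat) => t.set (s[i]!).toNat ((n : Int) - 1 - i))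
    (List.replicate 256 (n : Int))

def build_good_suffix_table (p : String) : List Int :=
  let s := p.toList
  let n := s.length
  let st := ((List.range n).map (fun k => n - k)).foldl   -- i = n, n-1, …, 1
    (fun (tl : List Int × Nat) i =>
      let lp := if is_prefix_of_pattern s i then i else tl.2
      (tl.1.set (n - i) ((lp : Int) - i + n), lp))
    (List.replicate n (0 : Int), n)
  (List.range (n - 1)).foldl
    (fun t i =>
      let size := suffix_length_matching_prefix s i
      t.set size ((n : Int) - 1 - i + size))
    st.1

def preprocess_patterns (list_patterns : List String) : List (List Int) × List (List Int) × List Int :=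
  list_patterns.foldl
    (fun (acc : List (List Int) × List (List Int) × List Int) pattern =>
      (acc.1 ++ [build_bad_character_table pattern],
       acc.2.1 ++ [build_good_suffix_table pattern],
       acc.2.2 ++ [(0 : Int)]))
    ([], [], [])

-- ===== PORT B =====
-- while j + k < n and s[k] == s[j+k]: k += 1
def zExtend (s : List Char) (j k : Nat) : Nat :=
  if h : j + k < s.length ∧ s[k]! = s[j + k]! then zExtend s j (k + 1) else k
termination_by s.length - (j + k)
decreasing_by omega

def zStep (s : List Char) (st : List Nat × Nat × Nat) (j : Nat) : List Nat × Nat × Nat :=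
  let k0 := if j < st.2.2 then min (st.2.2 - j) (st.1[j - st.2.1]!) else 0
  let k := zExtend s j k0
  let z' := st.1.set j k
  if st.2.2 < j + k then (z', j, j + k) else (z', st.2.1, st.2.2)

def zArray (s : List Char) : List Nat :=
  let n := s.length
  let z0 := if n = 0 then [] else (List.replicate n 0).set 0 n
  ((List.range' 1 (n - 1)).foldl (zStep s) (z0, 0, 0)).1

def preprocess_one_alt (p : String) : List Int × List Int :=
  let s := p.toList
  let n := s.length
  let z := zArray s
  let zrev := zArray s.reverse
  let st := ((List.range n).map (fun k => n - k)).foldl   -- i = n, n-1, …, 1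
    (fun (tl : List Int × Nat) i =>
      let lp := if i = n || z[i]! == n - i then i else tl.2
      (tl.1.set (n - i) ((lp : Int) - i + n), lp))
    (List.replicate n (0 : Int), n)
  let good := (List.range (n - 1)).foldl
    (fun t i =>
      let size := zrev[n - 1 - i]!
      t.set size ((n : Int) - 1 - i + size))
    st.1
  let last := (List.range (n - 1)).foldl
    (fun (d : PySem.Dict Nat Nat) i => d.insert (s[i]!).toNat i) PySem.Dict.empty
  let bad := last.items.foldl
    (fun t p => t.set p.1 ((n : Int) - 1 - p.2)) (List.replicate 256 (n : Int))
  (bad, good)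

def preprocess_patterns_alt (list_patterns : List String) : List (List Int) × List (List Int) × List Int :=
  list_patterns.foldl
    (fun (acc : List (List Int) × List (List Int) × List Int) pattern =>
      let bg := preprocess_one_alt pattern
      (acc.1 ++ [bg.1], acc.2.1 ++ [bg.2], acc.2.2 ++ [(0 : Int)]))
    ([], [], [])

-- ===== PRECONDITION & SPEC =====
def Spec_preprocess_patterns (list_patterns : List String) (out : List (List Int) × List (List Int) × List Int) : Prop := out = preprocess_patterns_alt list_patterns
instance (list_patterns : List String) (out : List (List Int) × List (List Int) × List Int) : Decidable (Spec_preprocess_patterns list_patterns out) := by unfold Spec_preprocess_patterns; infer_instance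

-- ===== CLAIM (what is proved, stated in full; the proofs are below) =====
def Claim_equal_preprocess_patterns : Prop := ∀ (list_patterns : List String), Dom_preprocess_patterns list_patterns → Spec_preprocess_patterns list_patterns (preprocess_patterns list_patterns)

-- ===== LEMMAS AND PROOFS =====
def lcp : List Char → List Char → Nat
  | a :: as, b :: bs => if a = b then lcp as bs + 1 else 0
  | _, _ => 0

theorem lcp_le_left : ∀ (a b : List Char), lcp a b ≤ a.length
  | [], _ => by simp [lcp]
  | _ :: _, [] => by simp [lcp]
  | a :: as, b :: bs => by
    simp only [lcp, List.length_cons]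
    split
    · exact Nat.succ_le_succ (lcp_le_left as bs)
    · omega

theorem lcp_le_right : ∀ (a b : List Char), lcp a b ≤ b.length
  | [], _ => by simp [lcp]
  | _ :: _, [] => by simp [lcp]
  | a :: as, b :: bs => by
    simp only [lcp, List.length_cons]
    split
    · exact Nat.succ_le_succ (lcp_le_right as bs)
    · omega

theorem lcp_self : ∀ (a : List Char), lcp a a = a.length
  | [] => by simp [lcp]
  | a :: as => by simp [lcp, lcp_self as]

theorem getElem!_lt_lcp : ∀ (a b : List Char) (t : Nat), t < lcp a b → a[t]! = b[t]!
  | [], _, _, h => by simp [lcp] at h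
  | _ :: _, [], _, h => by simp [lcp] at h
  | a :: as, b :: bs, t, h => by
    simp only [lcp] at h
    split at h
    · next hab =>
      cases t with
      | zero => simpa using hab
      | succ t =>
        simp only [List.getElem!_cons_succ]
        exact getElem!_lt_lcp as bs t (by omega)
    · omega

theorem le_lcp_of_agree : ∀ (a b : List Char) (m : Nat), m ≤ a.length → m ≤ b.length →
    (∀ t, t < m → a[t]! = b[t]!) → m ≤ lcp a b
  | _, _, 0, _, _, _ => Nat.zero_le _
  | a :: as, b :: bs, m + 1, ha, hb, hag => by
    have h0 : a = b := by simpa using hag 0 (Nat.succ_pos m)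
    simp only [lcp, if_pos h0]
    have := le_lcp_of_agree as bs m (by simpa using ha) (by simpa using hb)
      (fun t ht => by simpa using hag (t + 1) (by omega))
    omega
  | [], _, m + 1, ha, _, _ => by simp at ha
  | _ :: _, [], m + 1, _, hb, _ => by simp at hb

theorem lcp_drop : ∀ (k : Nat) (a b : List Char), k ≤ lcp a b →
    lcp a b = k + lcp (a.drop k) (b.drop k)
  | 0, a, b, _ => by simp
  | k + 1, a :: as, b :: bs, h => by
    simp only [lcp] at h ⊢
    split at h
    · next hab =>
      rw [if_pos hab]
      have := lcp_drop k as bs (by omega)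
      simp only [List.drop_succ_cons]
      omega
    · omega
  | k + 1, [], b, h => by simp [lcp] at h
  | k + 1, _ :: _, [], h => by simp [lcp] at h


def zspec (s : List Char) (j : Nat) : Nat := lcp (s.drop j) s

theorem drop_cons_getElem! (s : List Char) (m : Nat) (h : m < s.length) :
    s.drop m = s[m]! :: s.drop (m + 1) := by
  rw [getElem!_pos s m h]; exact List.drop_eq_getElem_cons h

theorem zExtend_eq (s : List Char) (j k : Nat) :
    zExtend s j k = k + lcp (s.drop (j + k)) (s.drop k) := by
  fun_induction zExtend with
  | case1 k h ih =>
    have hk : k < s.length := by omega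
    rw [ih, drop_cons_getElem! s (j + k) h.1, drop_cons_getElem! s k hk]
    simp only [lcp, if_pos h.2.symm]
    have e1 : j + (k + 1) = j + k + 1 := by omega
    rw [e1]
    omega
  | case2 k h =>
    by_cases hjk : j + k < s.length
    · have hk : k < s.length := by omega
      have hne : s[j + k]! ≠ s[k]! := fun he => h ⟨hjk, he.symm⟩
      rw [drop_cons_getElem! s (j + k) hjk, drop_cons_getElem! s k hk]
      simp only [lcp, if_neg hne]
      omega
    · rw [List.drop_eq_nil_of_le (by omega)]
      simp [lcp]

theorem zExtend_eq_zspec (s : List Char) (j k : Nat) (hk : k ≤ zspec s j) :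
    zExtend s j k = zspec s j := by
  rw [zExtend_eq]
  unfold zspec at *
  rw [lcp_drop k _ _ hk, List.drop_drop]

theorem isPrefixLoop_eq (s : List Char) (pos : Nat) : ∀ (i : Nat), pos ≤ i → i ≤ s.length →
    isPrefixLoop s pos i = decide (lcp (s.drop i) (s.drop (i - pos)) = s.length - i) := by
  intro i
  fun_induction isPrefixLoop s pos i
  case case1 i hlt hne =>
    intro hpos _
    have hip : i - pos < s.length := by omega
    rw [drop_cons_getElem! s i hlt, drop_cons_getElem! s (i - pos) hip]
    have hne' : s[i]! ≠ s[i - pos]! := hne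
    simp only [lcp, if_neg hne']
    have : s.length - i ≠ 0 := by omega
    simp [this.symm]
  case case2 i hlt hne ih =>
    intro hpos _
    have hip : i - pos < s.length := by omega
    have heq : s[i]! = s[i - pos]! := by
      by_contra hc; exact hne hc
    rw [drop_cons_getElem! s i hlt, drop_cons_getElem! s (i - pos) hip]
    simp only [lcp, if_pos heq]
    rw [ih (by omega) (by omega)]
    have e1 : i + 1 - pos = i - pos + 1 := by omega
    have e2 : s.length - i = (s.length - (i + 1)) + 1 := by omega
    rw [e1, e2]
    simp
  case case3 i hge =>
    intro hpos hile
    have : i = s.length := by omega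
    subst this
    rw [List.drop_eq_nil_of_le (le_refl _)]
    simp [lcp]
theorem suffLenLoop_eq (s : List Char) : ∀ (i1 j1 size : Nat), i1 ≤ j1 → j1 ≤ s.length →
    suffLenLoop s i1 j1 size = size + lcp ((s.take i1).reverse) ((s.take j1).reverse) := by
  intro i1
  induction i1 with
  | zero => intro j1 size _ _; simp [suffLenLoop, lcp]
  | succ i ih =>
    intro j1 size hij hjle
    obtain ⟨j, rfl⟩ : ∃ j, j1 = j + 1 := ⟨j1 - 1, by omega⟩
    have hi : i < s.length := by omega
    have hj : j < s.length := by omega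
    have ti : (s.take (i + 1)).reverse = s[i]! :: (s.take i).reverse := by
      rw [List.take_add_one, List.getElem?_eq_getElem hi, getElem!_pos s i hi]
      simp
    have tj : (s.take (j + 1)).reverse = s[j]! :: (s.take j).reverse := by
      rw [List.take_add_one, List.getElem?_eq_getElem hj, getElem!_pos s j hj]
      simp
    simp only [suffLenLoop, Nat.add_sub_cancel, ti, tj, lcp]
    by_cases hc : s[i]! = s[j]!
    · rw [if_pos hc, if_pos hc, ih j (size + 1) (by omega) (by omega)]
      omega
    · rw [if_neg hc, if_neg hc]; omega

theorem getElem!_drop (s : List Char) (j t : Nat) (h : j + t < s.length) :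
    (s.drop j)[t]! = s[j + t]! := by
  have ht : t < (s.drop j).length := by simp; omega
  rw [getElem!_pos (s.drop j) t ht, getElem!_pos s (j + t) h]
  exact List.getElem_drop

theorem zspec_le (s : List Char) (j : Nat) : zspec s j ≤ s.length - j := by
  have := lcp_le_left (s.drop j) s
  simpa [zspec] using this

theorem zspec_agree (s : List Char) (l u : Nat) (hu : u < zspec s l) : s[l + u]! = s[u]! := by
  have h1 : u < (s.drop l).length := lt_of_lt_of_le hu (lcp_le_left _ _)
  have h2 : l + u < s.length := by simp at h1; omega
  have := getElem!_lt_lcp (s.drop l) s u hu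
  rwa [getElem!_drop s l u h2] at this

def Zinv (s : List Char) (j : Nat) (st : List Nat × Nat × Nat) : Prop :=
  st.1.length = s.length ∧
  (∀ t, t < j → t < s.length → st.1[t]! = zspec s t) ∧
  st.2.1 < j ∧
  st.2.2 ≤ s.length ∧
  st.2.2 ≤ st.2.1 + zspec s st.2.1 ∧
  (st.2.2 = 0 ∨ 1 ≤ st.2.1)

theorem zStep_inv (s : List Char) (j : Nat) (st : List Nat × Nat × Nat)
    (h1 : 1 ≤ j) (h2 : j < s.length) (hI : Zinv s j st) :
    Zinv s (j + 1) (zStep s st j) := by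
  obtain ⟨z, l, r⟩ := st
  obtain ⟨hlen0, hcorr0, hlj0, hrn0, hrz0, hl00⟩ := hI
  have hlen : z.length = s.length := hlen0
  have hcorr : ∀ t, t < j → t < s.length → z[t]! = zspec s t := hcorr0
  have hlj : l < j := hlj0
  have hrn : r ≤ s.length := hrn0
  have hrz : r ≤ l + zspec s l := hrz0
  have hl0 : r = 0 ∨ 1 ≤ l := hl00
  clear hlen0 hcorr0 hlj0 hrn0 hrz0 hl00
  simp only [Zinv, zStep]
  set k0 := if j < r then min (r - j) (z[j - l]!) else 0 with hk0
  have hk0le : k0 ≤ zspec s j := by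
    rw [hk0]
    split
    · next hjr =>
      have hl1 : 1 ≤ l := by omega
      have hjl : j - l < j := by omega
      have hjln : j - l < s.length := by omega
      rw [hcorr (j - l) hjl hjln]
      have hzl := zspec_le s l
      have hzjl := zspec_le s (j - l)
      set m := min (r - j) (zspec s (j - l)) with hm
      have hag : ∀ t, t < m → (s.drop j)[t]! = s[t]! := by
        intro t ht
        have h3 : j + t < r := by omega
        have e1 : s[j + t]! = s[(j - l) + t]! := by
          have h4 : (j - l) + t < zspec s l := by omega
          have h5 := zspec_agree s l ((j - l) + t) h4
          rwa [(by omega : l + ((j - l) + t) = j + t)] at h5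
        have e2 : s[(j - l) + t]! = s[t]! := zspec_agree s (j - l) t (by omega)
        rw [getElem!_drop s j t (by omega), e1, e2]
      exact le_lcp_of_agree _ _ m (by simp; omega) (by omega) hag
    · omega
  set K := zExtend s j k0 with hKdef
  have hK : K = zspec s j := zExtend_eq_zspec s j k0 hk0le
  have hKle : zspec s j ≤ s.length - j := zspec_le s j
  have hzlen : (z.set j K).length = s.length := by simp [hlen]
  have hcorr' : ∀ t, t < j + 1 → t < s.length → (z.set j K)[t]! = zspec s t := by
    intro t ht htn
    by_cases hte : t = j
    · subst hte
      rw [getElem!_pos _ _ (by simpa [hlen] using htn), List.getElem_set_self]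
      exact hK
    · rw [getElem!_pos _ _ (by simpa [hlen] using htn),
        List.getElem_set_ne (by omega), ← getElem!_pos z t (by omega)]
      exact hcorr t (by omega) htn
  split
  · next hlt =>
    refine ⟨hzlen, hcorr', ?_, ?_, ?_, ?_⟩
    · show j < j + 1; omega
    · show j + K ≤ s.length; omega
    · show j + K ≤ j + zspec s j; omega
    · exact Or.inr (show 1 ≤ j from h1)
  · next hge =>
    exact ⟨hzlen, hcorr', show l < j + 1 by omega, hrn, hrz, hl0⟩

theorem zfold_inv (s : List Char) (z0 : List Nat) (hz : Zinv s 1 (z0, 0, 0)) :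
    ∀ m, m + 1 ≤ s.length → Zinv s (m + 1) ((List.range' 1 m).foldl (zStep s) (z0, 0, 0)) := by
  intro m
  induction m with
  | zero => intro _; simpa using hz
  | succ m ih =>
    intro h
    rw [List.range'_1_concat, List.foldl_append, (by omega : (1:Nat) + m = m + 1)]
    simp only [List.foldl_cons, List.foldl_nil]
    exact zStep_inv s (m + 1) _ (by omega) (by omega) (ih (by omega))

theorem zinit (s : List Char) (_h : s.length ≠ 0) :
    Zinv s 1 ((List.replicate s.length 0).set 0 s.length, 0, 0) := by
  refine ⟨by simp, ?_, by simp, by simp, by simp, Or.inl rfl⟩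
  intro t ht htn
  have ht0 : t = 0 := by omega
  subst ht0
  rw [getElem!_pos _ _ (by simpa using htn), List.getElem_set_self]
  simp [zspec, lcp_self]

theorem zArray_inv (s : List Char) (h : s.length ≠ 0) :
    Zinv s s.length ((List.range' 1 (s.length - 1)).foldl (zStep s)
      ((List.replicate s.length 0).set 0 s.length, 0, 0)) := by
  have := zfold_inv s _ (zinit s h) (s.length - 1) (by omega)
  rwa [(by omega : s.length - 1 + 1 = s.length)] at this

theorem zArray_correct (s : List Char) (j : Nat) (hj : j < s.length) :
    (zArray s)[j]! = zspec s j := by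
  unfold zArray
  have h : s.length ≠ 0 := by omega
  simp only [if_neg h]
  exact (zArray_inv s h).2.1 j hj hj

theorem is_prefix_eq (s : List Char) (i : Nat) (hi : i ≤ s.length) :
    is_prefix_of_pattern s i = decide (zspec s i = s.length - i) := by
  unfold is_prefix_of_pattern
  rw [isPrefixLoop_eq s i i (le_refl _) hi]
  simp [zspec]

theorem suffLen_eq (s : List Char) (pos : Nat) (h : pos + 1 < s.length) :
    suffix_length_matching_prefix s pos = zspec s.reverse (s.length - 1 - pos) := by
  unfold suffix_length_matching_prefix zspec
  rw [suffLenLoop_eq s (pos + 1) s.length 0 (by omega) (le_refl _)]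
  rw [List.drop_reverse, (by omega : s.length - (s.length - 1 - pos) = pos + 1)]
  simp [List.take_length]

theorem cond_eq (s : List Char) (i : Nat) (h1 : 1 ≤ i) (h2 : i ≤ s.length) :
    is_prefix_of_pattern s i = (decide (i = s.length) || ((zArray s)[i]! == s.length - i)) := by
  rw [is_prefix_eq s i h2]
  by_cases he : i = s.length
  · subst he
    have : zspec s s.length = 0 := by
      simp [zspec, List.drop_eq_nil_of_le (le_refl _), lcp]
    simp [this]
  · have hi : i < s.length := by omega
    rw [zArray_correct s i hi]
    by_cases hz : zspec s i = s.length - i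
    · simp [he, hz]
    · simp [he, hz]

theorem good_suffix_eq (p : String) : build_good_suffix_table p = (preprocess_one_alt p).2 := by
  unfold build_good_suffix_table preprocess_one_alt
  dsimp only
  set s := p.toList with hs
  have hfold1 :
      ((List.range s.length).map (fun k => s.length - k)).foldl
        (fun (tl : List Int × Nat) i =>
          (tl.1.set (s.length - i) ((if is_prefix_of_pattern s i then i else tl.2 : Nat) - (i:Int) + s.length),
           if is_prefix_of_pattern s i then i else tl.2))
        (List.replicate s.length (0 : Int), s.length)
      = ((List.range s.length).map (fun k => s.length - k)).foldl
        (fun (tl : List Int × Nat) i =>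
          (tl.1.set (s.length - i) ((if i = s.length || (zArray s)[i]! == s.length - i then i else tl.2 : Nat) - (i:Int) + s.length),
           if i = s.length || (zArray s)[i]! == s.length - i then i else tl.2))
        (List.replicate s.length (0 : Int), s.length) := by
    apply PySem.List.foldl_congr_mem
    intro acc i hi
    have hmem : 1 ≤ i ∧ i ≤ s.length := by
      simp only [List.mem_map, List.mem_range] at hi
      obtain ⟨k, hk, rfl⟩ := hi
      omega
    rw [cond_eq s i hmem.1 hmem.2]
  rw [hfold1]
  apply PySem.List.foldl_congr_mem
  intro acc i hi
  have hin : i < s.length - 1 := by simpa using hi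
  have : suffix_length_matching_prefix s i = (zArray s.reverse)[s.length - 1 - i]! := by
    rw [zArray_correct s.reverse (s.length - 1 - i) (by simp; omega)]
    exact suffLen_eq s i (by omega)
  rw [this]

theorem badchar_inv (s : List Char) (n : Int) : ∀ m : Nat,
    (List.range m).foldl (fun t (i : Nat) => t.set (s[i]!).toNat (n - 1 - i)) (List.replicate 256 n)
    = (List.range 256).map (fun c =>
        match ((List.range m).foldl (fun (d : PySem.Dict Nat Nat) i =>
            d.insert (s[i]!).toNat i) PySem.Dict.empty).get? c with
        | some i => n - 1 - i
        | none => n) := by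
  intro m
  induction m with
  | zero =>
    simp only [List.range_zero, List.foldl_nil, PySem.Dict.get?_empty]
    rw [List.map_const', List.length_range]
  | succ m ih =>
    rw [List.range_succ, List.foldl_append, List.foldl_append]
    simp only [List.foldl_cons, List.foldl_nil]
    rw [ih]
    apply List.ext_getElem
    · simp
    · intro c h1 h2
      simp only [List.getElem_set, List.getElem_map, List.getElem_range]
      have h2' : c < 256 := by simpa using h2
      rw [PySem.Dict.get?_insert]
      by_cases hc : (s[m]!).toNat = c
      · rw [if_pos hc, if_pos hc.symm]
      · rw [if_neg hc, if_neg (fun h => hc h.symm)]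

theorem items_fold_eq (n : Int) : ∀ (ps : List (Nat × Nat)), (ps.map Prod.fst).Nodup →
    ∀ (base : List Int), base.length = 256 →
    ps.foldl (fun t p => t.set p.1 (n - 1 - (p.2 : Int))) base
      = (List.range 256).map (fun c =>
          match (PySem.Dict.mk ps).get? c with
          | some i => n - 1 - (i : Int)
          | none => base[c]!) := by
  intro ps
  induction ps with
  | nil =>
    intro _ base hb
    simp only [List.foldl_nil]
    apply List.ext_getElem
    · simp [hb]
    · intro c h1 h2
      simp only [List.getElem_map, List.getElem_range]
      have h0 : (PySem.Dict.mk ([] : List (Nat × Nat))).get? c = none := rfl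
      rw [h0, getElem!_pos base c (by omega)]
  | cons p rest ih =>
    intro hnd base hb
    simp only [List.foldl_cons]
    have hnd' : (rest.map Prod.fst).Nodup := by
      simp only [List.map_cons, List.nodup_cons] at hnd
      exact hnd.2
    have hp1 : p.1 ∉ rest.map Prod.fst := by
      simp only [List.map_cons, List.nodup_cons] at hnd
      exact hnd.1
    rw [ih hnd' (base.set p.1 (n - 1 - (p.2 : Int))) (by simp [hb])]
    apply List.map_congr_left
    intro c hc
    have hc256 : c < 256 := by simpa using hc
    rw [PySem.Dict.get?_mk_cons]
    by_cases hpc : p.1 = c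
    · have hrest : (PySem.Dict.mk rest).get? c = none := by
        refine (PySem.Dict.get?_eq_none_iff_not_mem_keys _ c).mpr ?_
        show c ∉ (PySem.Dict.mk rest).items.map Prod.fst
        rw [hpc] at hp1
        exact hp1
      rw [hrest, if_pos (by simp [hpc])]
      rw [getElem!_pos _ c (by simp [hb]; omega), hpc, List.getElem_set_self]
    · rw [if_neg (by simp [hpc])]
      have hbase : (base.set p.1 (n - 1 - (p.2 : Int)))[c]! = base[c]! := by
        rw [getElem!_pos _ c (by simp [hb]; omega), List.getElem_set_ne hpc,
          ← getElem!_pos base c (by omega)]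
      rw [hbase]

theorem bad_char_eq (p : String) : build_bad_character_table p = (preprocess_one_alt p).1 := by
  unfold build_bad_character_table preprocess_one_alt
  dsimp only
  set s := p.toList with hs
  set d := (List.range (s.length - 1)).foldl
    (fun (d : PySem.Dict Nat Nat) i => d.insert (s[i]!).toNat i) PySem.Dict.empty with hd
  have hnd : (d.items.map Prod.fst).Nodup := by
    have := PySem.Dict.nodup_keys_foldl_insert_key (List.range (s.length - 1))
      (fun i => (s[i]!).toNat) (fun d i => i) PySem.Dict.empty PySem.Dict.nodup_keys_empty
    exact this
  rw [items_fold_eq ((s.length : Int)) d.items hnd (List.replicate 256 (s.length : Int)) (by rw [List.length_replicate])]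
  have hmk : PySem.Dict.mk d.items = d := by cases d; rfl
  rw [hmk]
  rw [badchar_inv s (s.length : Int) (s.length - 1)]
  apply List.map_congr_left
  intro c hc
  have hc256 : c < 256 := by simpa using hc
  rcases d.get? c with _ | i
  · rw [getElem!_pos _ _ (by simp only [List.length_replicate]; exact hc256), List.getElem_replicate]
  · rfl

-- ===== VERDICT (by name: the statement is the Claim_ definition above) =====
theorem preprocess_patterns_spec : Claim_equal_preprocess_patterns := by
  intro lp _
  unfold Spec_preprocess_patterns preprocess_patterns preprocess_patterns_alt
  apply PySem.List.foldl_congr_mem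
  intro acc pattern _
  revert acc
  intro acc
  simp [bad_char_eq, good_suffix_eq]
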